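-- pv_equiv track=rewrite | github.com/JacobEnder/SimplicialHomology | src/homology.py | is_simp_cplx
-- ===== SOURCE A (Python) =====
-- import itertools
--
-- def is_simp_cplx(vertices, faces):
--
--     # For all x in X, {x} in A
--     singletons = [sigma for sigma in faces if len(sigma) == 1]
--
--     if (len(singletons) != len(vertices)) : return False
--
--     # For all sigma in A, if tau <= sigma, then tau in A
--     faces_set = set(tuple(sorted(face)) for face in faces)
--
--     for sigma in faces_set:
--
--         # Generate all strict subsets
--         for k in range(1, len(sigma)):
--             for tau in itertools.combinations(sigma, k):
--                 if tuple(sorted(tau)) not in faces_set: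
--                     return False
--     return True
-- ===== SOURCE B (Python) =====
-- def is_simp_cplx(vertices, faces):
--     singletons = [sigma for sigma in faces if len(sigma) == 1]
--     if len(singletons) != len(vertices):
--         return False
--     faces_set = set(tuple(sorted(face)) for face in faces)
--     # Downward closure: checking only the remove-one-vertex subsets of each
--     # face suffices, transitivity gives all strict nonempty subsets.
--     for sigma in faces_set:
--         if len(sigma) > 1:
--             for i in range(len(sigma)):
--                 if sigma[:i] + sigma[i+1:] not in faces_set:
--                     return False
--     return True
-- ===== Notes on version B (the rewrite author's own statement) =====
-- stated objective: alternative
-- what changed: Instead of enumerating all 2^k strict subsets of every face via itertools.combinations, B checks only the k remove-one-vertex subsets of each face; transitivity of these checks over the face set gives full downward closure.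
import Mathlib
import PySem

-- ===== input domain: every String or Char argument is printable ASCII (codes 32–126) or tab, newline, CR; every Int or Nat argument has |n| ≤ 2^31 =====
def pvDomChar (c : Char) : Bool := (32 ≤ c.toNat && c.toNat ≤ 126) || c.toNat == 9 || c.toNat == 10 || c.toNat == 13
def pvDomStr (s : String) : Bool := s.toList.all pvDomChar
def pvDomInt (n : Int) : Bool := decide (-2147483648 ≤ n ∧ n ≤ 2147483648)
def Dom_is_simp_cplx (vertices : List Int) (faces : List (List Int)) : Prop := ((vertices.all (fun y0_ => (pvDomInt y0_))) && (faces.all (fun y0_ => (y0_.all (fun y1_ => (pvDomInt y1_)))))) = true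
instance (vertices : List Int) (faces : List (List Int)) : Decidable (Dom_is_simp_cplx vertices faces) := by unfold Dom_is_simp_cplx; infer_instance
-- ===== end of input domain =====

-- B replaces A's enumeration of all 2^k strict subsets of each face with the k
-- remove-one-vertex subsets only (transitivity gives full downward closure).
-- ===== PORT A =====
-- itertools.combinations(sigma, k) in index order: first the tuples containing
-- the head element, then those without it.
def pvCombos {α : Type} : Nat → List α → List (List α)
  | 0, _ => [[]]
  | _ + 1, [] => []
  | k + 1, x :: xs => (pvCombos k xs).map (x :: ·) ++ pvCombos (k + 1) xs

def is_simp_cplx (vertices : List Int) (faces : List (List Int)) : Bool :=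
  let singletons := faces.filter (fun sigma => sigma.length == 1)
  if singletons.length ≠ vertices.length then false
  else
    let faces_set : PySem.Set (List Int) :=
      PySem.Set.ofList (faces.map (fun face => PySem.List.sorted face (fun x => x) false))
    -- the early-return double loop, written as `all` over the same iterations
    faces_set.all (fun sigma =>
      (PySem.List.pyRange 1 (sigma.length : Int) 1).all (fun k =>
        (pvCombos k.toNat sigma).all (fun tau =>
          faces_set.contains (PySem.List.sorted tau (fun x => x) false))))

-- ===== PORT B =====
def is_simp_cplx_alt (vertices : List Int) (faces : List (List Int)) : Bool :=
  let singletons := faces.filter (fun sigma => sigma.length == 1)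
  if singletons.length ≠ vertices.length then false
  else
    let faces_set : PySem.Set (List Int) :=
      PySem.Set.ofList (faces.map (fun face => PySem.List.sorted face (fun x => x) false))
    faces_set.all (fun sigma =>
      if sigma.length > 1 then
        (PySem.List.pyRange 0 (sigma.length : Int) 1).all (fun i =>
          faces_set.contains
            (PySem.List.slice sigma none (some i) ++ PySem.List.slice sigma (some (i + 1)) none))
      else true)

-- ===== PRECONDITION & SPEC =====
def Spec_is_simp_cplx (vertices : List Int) (faces : List (List Int)) (out : Bool) : Prop := out = is_simp_cplx_alt vertices faces
instance (vertices : List Int) (faces : List (List Int)) (out : Bool) : Decidable (Spec_is_simp_cplx vertices faces out) := by unfold Spec_is_simp_cplx; infer_instance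

-- ===== CLAIM (what is proved, stated in full; the proofs are below) =====
def Claim_equal_is_simp_cplx : Prop := ∀ (vertices : List Int) (faces : List (List Int)), Dom_is_simp_cplx vertices faces → Spec_is_simp_cplx vertices faces (is_simp_cplx vertices faces)

-- ===== LEMMAS AND PROOFS =====

theorem mem_pvCombos {α : Type} (k : Nat) (xs tau : List α) :
    tau ∈ pvCombos k xs ↔ tau.Sublist xs ∧ tau.length = k := by
  induction xs generalizing k tau with
  | nil =>
    cases k with
    | zero =>
      simp only [pvCombos, List.mem_singleton, List.sublist_nil]
      constructor
      · rintro rfl; exact ⟨rfl, rfl⟩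
      · exact fun h => h.1
    | succ k =>
      simp only [pvCombos, List.not_mem_nil, false_iff, List.sublist_nil, not_and]
      rintro rfl h; simp at h
  | cons x xs ih =>
    cases k with
    | zero =>
      simp only [pvCombos, List.mem_singleton]
      constructor
      · rintro rfl; exact ⟨List.nil_sublist _, rfl⟩
      · rintro ⟨_, h⟩; exact List.eq_nil_of_length_eq_zero h
    | succ k =>
      simp [pvCombos, ih]
      constructor
      · rintro (⟨t, ⟨hs, hl⟩, rfl⟩ | ⟨hs, hl⟩)
        · exact ⟨List.Sublist.cons₂ x hs, by simp [hl]⟩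
        · exact ⟨hs.cons x, hl⟩
      · rintro ⟨hs, hl⟩
        cases hs with
        | cons _ h => exact Or.inr ⟨h, hl⟩
        | cons₂ _ h => exact Or.inl ⟨_, ⟨h, by simpa using hl⟩, rfl⟩

theorem sublist_eraseIdx_of_lt {α : Type} {tau sigma : List α}
    (h : tau.Sublist sigma) (hlen : tau.length < sigma.length) :
    ∃ i < sigma.length, tau.Sublist (sigma.eraseIdx i) := by
  induction h with
  | slnil => simp at hlen
  | @cons l₁ l₂ a h ih =>
    exact ⟨0, by simp, by simpa using h⟩
  | @cons₂ l₁ l₂ a h ih =>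
    simp only [List.length_cons, Nat.add_lt_add_iff_right] at hlen
    obtain ⟨i, hi, hs⟩ := ih hlen
    exact ⟨i + 1, by simpa using hi, by simpa [List.eraseIdx_cons_succ] using hs.cons₂ a⟩

-- every element of the deduplicated sorted-face set is ≤-sorted
theorem mem_facesSet_pairwise (faces : List (List Int)) (sigma : List Int)
    (h : sigma ∈ PySem.Set.ofList (faces.map (fun face => PySem.List.sorted face (fun x => x) false))) :
    sigma.Pairwise (· ≤ ·) := by
  rw [PySem.Set.mem_ofList] at h
  simp only [List.mem_map] at h
  obtain ⟨f, _, rfl⟩ := h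
  simpa using PySem.List.sorted_pairwise f (fun x => x)

-- A's inner checks over S, as a Prop
def pvDownA (S : List (List Int)) : Prop :=
  ∀ sigma ∈ S, ∀ tau : List Int, tau.Sublist sigma → 1 ≤ tau.length → tau.length < sigma.length → tau ∈ S

-- B's inner checks over S, as a Prop
def pvDownB (S : List (List Int)) : Prop :=
  ∀ sigma ∈ S, 1 < sigma.length → ∀ i < sigma.length, sigma.eraseIdx i ∈ S

theorem downB_closure (S : List (List Int)) (hB : pvDownB S) :
    ∀ n, ∀ sigma ∈ S, sigma.length ≤ n →
      ∀ tau : List Int, tau.Sublist sigma → 1 ≤ tau.length → tau.length < sigma.length → tau ∈ S := by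
  intro n
  induction n with
  | zero => intro sigma _ hle tau _ _ hlt; omega
  | succ n ih =>
    intro sigma hS hle tau hsub h1 hlt
    obtain ⟨i, hi, hsub'⟩ := sublist_eraseIdx_of_lt hsub hlt
    have hrhoS : sigma.eraseIdx i ∈ S := hB sigma hS (by omega) i hi
    have hrlen : (sigma.eraseIdx i).length = sigma.length - 1 := by
      simp [List.length_eraseIdx, hi]
    by_cases heq : tau.length = (sigma.eraseIdx i).length
    · rw [hsub'.eq_of_length heq]; exact hrhoS
    · have : tau.length < (sigma.eraseIdx i).length := by
        have := hsub'.length_le; omega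
      exact ih (sigma.eraseIdx i) hrhoS (by omega) tau hsub' h1 this

theorem downA_iff_downB (S : List (List Int)) :
    pvDownA S ↔ pvDownB S := by
  constructor
  · intro hA sigma hS hlen i hi
    refine hA sigma hS _ (List.eraseIdx_sublist sigma i) ?_ ?_ <;>
      simp [List.length_eraseIdx, hi] <;> omega
  · intro hB sigma hS tau hsub h1 hlt
    exact downB_closure S hB sigma.length sigma hS le_rfl tau hsub h1 hlt

theorem contains_eq_mem (S : List (List Int)) (x : List Int) :
    S.contains x = true ↔ x ∈ S := by
  simp

-- A's inner Bool check equals pvDownA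
theorem allA_iff (S : List (List Int)) (hsorted : ∀ sigma ∈ S, sigma.Pairwise (· ≤ ·)) :
    (S.all (fun sigma =>
      (PySem.List.pyRange 1 (sigma.length : Int) 1).all (fun k =>
        (pvCombos k.toNat sigma).all (fun tau =>
          S.contains (PySem.List.sorted tau (fun x => x) false)))) = true)
    ↔ pvDownA S := by
  simp only [List.all_eq_true, PySem.List.mem_pyRange_one, mem_pvCombos]
  constructor
  · intro h sigma hS tau hsub h1 hlt
    have := h sigma hS (tau.length : Int)
      ⟨by exact_mod_cast h1, by exact_mod_cast hlt⟩ tau ⟨hsub, by simp⟩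
    rw [contains_eq_mem] at this
    have htau : tau.Pairwise (· ≤ ·) := (hsorted sigma hS).sublist hsub
    rwa [PySem.List.sorted_eq_self_of_pairwise _ _ (by simpa using htau)] at this
  · intro h sigma hS k hk tau htau
    obtain ⟨hk1, hk2⟩ := hk
    obtain ⟨hsub, hlen⟩ := htau
    have h1 : 1 ≤ tau.length := by omega
    have h2 : tau.length < sigma.length := by omega
    have hmem : tau ∈ S := h sigma hS tau hsub h1 h2
    have htau : tau.Pairwise (· ≤ ·) := (hsorted sigma hS).sublist hsub
    rw [PySem.List.sorted_eq_self_of_pairwise _ _ (by simpa using htau), contains_eq_mem]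
    exact hmem

theorem allB_iff (S : List (List Int)) :
    (S.all (fun sigma =>
      if sigma.length > 1 then
        (PySem.List.pyRange 0 (sigma.length : Int) 1).all (fun i =>
          S.contains
            (PySem.List.slice sigma none (some i) ++ PySem.List.slice sigma (some (i + 1)) none))
      else true) = true)
    ↔ pvDownB S := by
  simp only [List.all_eq_true]
  constructor
  · intro h sigma hS hlen i hi
    have := h sigma hS
    rw [if_pos (by omega : sigma.length > 1), List.all_eq_true] at this
    have hc := this (i : Int)
      (by rw [PySem.List.mem_pyRange_one]; exact ⟨by positivity, by exact_mod_cast hi⟩)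
    rw [PySem.List.slice_to _ (by positivity), PySem.List.slice_from _ (by positivity),
      contains_eq_mem] at hc
    have : (↑i : Int).toNat = i := by simp
    rw [this] at hc
    have h1 : ((i : Int) + 1).toNat = i + 1 := by omega
    rw [h1, ← List.eraseIdx_eq_take_drop_succ] at hc
    exact hc
  · intro h sigma hS
    by_cases hlen : sigma.length > 1
    · rw [if_pos hlen, List.all_eq_true]
      intro i hmem
      rw [PySem.List.mem_pyRange_one] at hmem
      obtain ⟨hi0, hi⟩ := hmem
      rw [PySem.List.slice_to _ hi0, PySem.List.slice_from _ (by omega), contains_eq_mem]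
      have h1 : (i + 1).toNat = i.toNat + 1 := by omega
      rw [h1, ← List.eraseIdx_eq_take_drop_succ]
      exact h sigma hS hlen i.toNat (by omega)
    · rw [if_neg hlen]

-- ===== VERDICT (by name: the statement is the Claim_ definition above) =====
theorem is_simp_cplx_spec : Claim_equal_is_simp_cplx := by
  intro vertices faces _
  unfold Spec_is_simp_cplx is_simp_cplx is_simp_cplx_alt
  by_cases hcond :
      (faces.filter (fun sigma => sigma.length == 1)).length ≠ vertices.length
  · rw [if_pos hcond, if_pos hcond]
  · rw [if_neg hcond, if_neg hcond]
    set S := PySem.Set.ofList (faces.map (fun face => PySem.List.sorted face (fun x => x) false)) with hSdef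
    have hsorted : ∀ sigma ∈ S, sigma.Pairwise (· ≤ ·) := fun sigma h =>
      mem_facesSet_pairwise faces sigma (hSdef ▸ h)
    have hiff := (allA_iff S hsorted).trans
      ((downA_iff_downB S).trans (allB_iff S).symm)
    exact Bool.eq_iff_iff.mpr hiff
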